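-- pv_equiv track=rewrite | github.com/sbdzdz/disco | scripts/visualize_loss_test.py | take_last
-- ===== SOURCE A (Python) =====
-- def take_last(scan):
--     """If there are multiple values for the same step, take the last one."""
--     result = []
--     current_step = None
--     for row in reversed(list(scan)):
--         step, value = row.values()
--         if step != current_step:
--             result.append(value)
--             current_step = step
--     return result[::-1]
-- ===== SOURCE B (Python) =====
-- def take_last(scan):
--     """If there are multiple values for the same step, take the last one."""
--     result = []
--     current = None  # (step, value) of the consecutive group in progress
--     for row in scan:
--         step, value = row.values()
--         if current is not None and step != current[0]:
--             result.append(current[1])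
--         current = (step, value)
--     if current is not None:
--         result.append(current[1])
--     return result
-- ===== Notes on version B (the rewrite author's own statement) =====
-- stated objective: idiomatic
-- what changed: Forward single pass that flushes the pending last value of each consecutive step group when the step changes (plus a final flush), instead of A's reversed traversal that keeps first-seen values and then reverses the result.
import Mathlib
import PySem

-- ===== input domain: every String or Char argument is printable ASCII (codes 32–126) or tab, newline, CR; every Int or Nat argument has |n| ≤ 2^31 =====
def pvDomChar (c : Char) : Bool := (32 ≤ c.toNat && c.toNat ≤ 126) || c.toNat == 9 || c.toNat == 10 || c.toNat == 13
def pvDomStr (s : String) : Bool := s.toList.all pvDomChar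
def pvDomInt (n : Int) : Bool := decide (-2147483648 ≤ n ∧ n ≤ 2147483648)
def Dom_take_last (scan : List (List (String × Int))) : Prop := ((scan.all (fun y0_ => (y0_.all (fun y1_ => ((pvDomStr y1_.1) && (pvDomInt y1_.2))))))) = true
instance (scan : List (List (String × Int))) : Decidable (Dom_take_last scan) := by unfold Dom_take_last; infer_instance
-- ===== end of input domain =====

-- B is a forward single pass flushing the last value of each consecutive step group on change;
-- A walks the list reversed, keeps first-seen values per group, and reverses the result. Same values, proved equal.

-- ===== PORT A =====

-- `step, value = row.values()`: the pair of the row-dict's two values (none = ValueError, excluded by Pre_)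
def rowVals (row : List (String × Int)) : Option (Int × Int) :=
  match (PySem.Dict.ofList row).values with
  | [step, value] => some (step, value)
  | _ => none

-- loop body of A: append value and update current_step when the step differs
def stepA (acc : List Int × Option Int) (row : List (String × Int)) : List Int × Option Int :=
  match rowVals row with
  | some (step, value) => if some step ≠ acc.2 then (acc.1 ++ [value], some step) else acc
  | none => acc

def take_last (scan : List (List (String × Int))) : List Int :=
  -- for row in reversed(list(scan)): …  then result[::-1]
  ((scan.reverse.foldl stepA ([], none)).1).reverse

-- ===== PORT B =====

-- loop body of B: flush the pending (step, value) when the step changes, then make the row pending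
def stepB (acc : List Int × Option (Int × Int)) (row : List (String × Int)) :
    List Int × Option (Int × Int) :=
  match rowVals row with
  | some (step, value) =>
    match acc.2 with
    | some (cs, lv) =>
        if step ≠ cs then (acc.1 ++ [lv], some (step, value)) else (acc.1, some (step, value))
    | none => (acc.1, some (step, value))
  | none => acc

-- final flush: if current is not None: result.append(current[1])
def finishB (st : List Int × Option (Int × Int)) : List Int :=
  match st.2 with
  | some (_, lv) => st.1 ++ [lv]
  | none => st.1

def take_last_alt (scan : List (List (String × Int))) : List Int :=
  finishB (scan.foldl stepB ([], none))

-- ===== PRECONDITION & SPEC =====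
-- Pre_ excludes rows whose dict does not have exactly two values: there `step, value = row.values()` raises ValueError in both A and B.
def Pre_take_last (scan : List (List (String × Int))) : Prop :=
  ∀ row ∈ scan, ((PySem.Dict.ofList row).values).length = 2
instance (scan : List (List (String × Int))) : Decidable (Pre_take_last scan) := by
  unfold Pre_take_last; infer_instance

def pvWitness_take_last : (List (List (String × Int))) :=
  [[("step", 1), ("value", 5)], [("step", 1), ("value", 7)], [("step", 2), ("value", 3)]]

def Spec_take_last (scan : List (List (String × Int))) (out : List Int) : Prop := out = take_last_alt scan
instance (scan : List (List (String × Int))) (out : List Int) : Decidable (Spec_take_last scan out) := by unfold Spec_take_last; infer_instance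

-- ===== CLAIM (what is proved, stated in full; the proofs are below) =====
def Claim_equal_take_last : Prop := ∀ (scan : List (List (String × Int))), Dom_take_last scan → Pre_take_last scan → Spec_take_last scan (take_last scan)

-- ===== LEMMAS AND PROOFS =====

-- the last value of each maximal run of consecutive equal steps
def gspec : List (Int × Int) → List Int
  | [] => []
  | [(_, v)] => [v]
  | (s1, v1) :: (s2, v2) :: t =>
      if s1 = s2 then gspec ((s2, v2) :: t) else v1 :: gspec ((s2, v2) :: t)

def pairs (scan : List (List (String × Int))) : List (Int × Int) := scan.filterMap rowVals

-- pure form of A's reversed fold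
def apure : List (Int × Int) → List Int × Option Int
  | [] => ([], none)
  | (s, v) :: t =>
      let a := apure t
      if some s ≠ a.2 then (a.1 ++ [v], some s) else a

lemma apure_snd (s : Int) (v : Int) (t : List (Int × Int)) : (apure ((s, v) :: t)).2 = some s := by
  simp only [apure]
  split
  · rfl
  · next h => simp at h; exact h.symm

lemma foldr_stepA (l : List (List (String × Int))) :
    l.foldr (fun row acc => stepA acc row) ([], none) = apure (pairs l) := by
  induction l with
  | nil => rfl
  | cons row t ih =>
    show stepA (t.foldr (fun row acc => stepA acc row) ([], none)) row = apure (pairs (row :: t))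
    rw [ih]
    cases hp : rowVals row with
    | none => simp [stepA, hp, pairs]
    | some p =>
      cases p with
      | mk s v => simp only [stepA, hp, pairs, List.filterMap_cons, apure]

lemma apure_reverse (p : List (Int × Int)) : (apure p).1.reverse = gspec p := by
  induction p with
  | nil => rfl
  | cons h t ih =>
    cases h with
    | mk s v =>
      cases t with
      | nil => simp [apure, gspec]
      | cons h2 t2 =>
        cases h2 with
        | mk s2 v2 =>
          have hsnd := apure_snd s2 v2 t2
          have hcons : apure ((s, v) :: (s2, v2) :: t2)
              = if some s ≠ (apure ((s2, v2) :: t2)).2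
                then ((apure ((s2, v2) :: t2)).1 ++ [v], some s)
                else apure ((s2, v2) :: t2) := rfl
          rw [hcons, hsnd]
          by_cases hs : s = s2
          · simp [hs, gspec, ih]
          · simp [hs, gspec, ih]

lemma foldl_stepB_some (l : List (List (String × Int))) :
    ∀ (res : List Int) (cs lv : Int),
      finishB (l.foldl stepB (res, some (cs, lv))) = res ++ gspec ((cs, lv) :: pairs l) := by
  induction l with
  | nil => intro res cs lv; simp [finishB, pairs, gspec]
  | cons row t ih =>
    intro res cs lv
    cases hp : rowVals row with
    | none => simp [List.foldl, stepB, hp, ih, pairs]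
    | some p =>
      cases p with
      | mk s v =>
        by_cases hs : s = cs
        · simp [List.foldl, stepB, hp, hs, ih, pairs, gspec]
        · simp [List.foldl, stepB, hp, hs, ih, pairs, gspec]
          omega

lemma foldl_stepB_none (l : List (List (String × Int))) :
    finishB (l.foldl stepB ([], none)) = gspec (pairs l) := by
  induction l with
  | nil => rfl
  | cons row t ih =>
    cases hp : rowVals row with
    | none => simp [List.foldl, stepB, hp, ih, pairs]
    | some p =>
      cases p with
      | mk s v =>
        simp [List.foldl, stepB, hp, pairs, foldl_stepB_some]

-- ===== VERDICT (by name: the statement is the Claim_ definition above) =====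
theorem take_last_spec : Claim_equal_take_last := by
  intro scan _ _
  unfold Spec_take_last take_last take_last_alt
  rw [List.foldl_reverse]
  rw [foldr_stepA, apure_reverse, foldl_stepB_none]
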